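-- pv_equiv track=rewrite | github.com/Imene-ka/opencv | algo_RLE.py | rle_binaire_inverse
-- ===== SOURCE A (Python) =====
-- def recuperation(d) :
--     result = []
--     val = 0
--     i = 0
--     while i < len(d) :
--         if d[i] == 255 :
--             while d[i] == 255 :
--                  val = val + d[i]
--                  i = i + 1
--             result.append(val+d[i])
--             val = 0
--         else :
--             result.append(d[i])
--         i = i + 1
--     return result
--
-- def rle_binaire_inverse(d) :
--     i=0
--     pre=""
--     sortie=""
--     donnee = recuperation(d)
--     while i<len(donnee) :
--         if pre=="" or pre=="0" :
--              sortie = sortie + ("0" * donnee[i])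
--              pre="1"
--         else :
--             sortie = sortie + ("1" * donnee[i])
--             pre="0"
--         i=i+1
--     return sortie
-- ===== SOURCE B (Python) =====
-- def rle_binaire_inverse(d):
--     chunks = []
--     n = len(d)
--     i = 0
--     parity = 0
--     while i < n:
--         run = 0
--         while i < n and d[i] == 255:
--             run += 255
--             i += 1
--         run += d[i]  # IndexError on a trailing 255 run, like the original
--         i += 1
--         chunks.append(("0" if parity % 2 == 0 else "1") * run)
--         parity += 1
--     return "".join(chunks)
-- ===== Notes on version B (the rewrite author's own statement) =====
-- stated objective: simpler
-- what changed: B fuses A's two passes (recuperation building an intermediate run list, then a string-toggle emission loop) into one indexed pass that decodes each run and emits its chunk immediately, replacing the 'pre' string toggle by an integer parity counter and A's repeated string concatenation by a chunk list joined once.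
import Mathlib
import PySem

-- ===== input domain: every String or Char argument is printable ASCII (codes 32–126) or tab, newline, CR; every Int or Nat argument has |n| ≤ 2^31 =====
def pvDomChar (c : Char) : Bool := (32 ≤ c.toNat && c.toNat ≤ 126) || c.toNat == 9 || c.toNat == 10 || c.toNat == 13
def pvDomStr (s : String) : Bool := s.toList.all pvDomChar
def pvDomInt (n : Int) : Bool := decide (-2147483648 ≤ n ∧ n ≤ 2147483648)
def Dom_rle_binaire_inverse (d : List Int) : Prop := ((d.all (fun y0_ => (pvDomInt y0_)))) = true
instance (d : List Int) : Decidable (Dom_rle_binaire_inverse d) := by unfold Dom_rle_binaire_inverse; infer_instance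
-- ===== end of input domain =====

-- B fuses A's two passes (run-list decoding, then toggle emission) into one indexed pass
-- emitting parity-chosen chunks joined at the end; same return value on Pre_ (no trailing 255 run).


-- ===== PORT A =====
-- inner `while d[i] == 255 : val += d[i]; i += 1` of recuperation
-- (out-of-range read raises in Python; such inputs are outside Pre_, the port just stops)
def pvRecupInner (d : List Int) (i : Nat) (val : Int) : Nat × Int :=
  match h : d[i]? with
  | some v => if v = 255 then pvRecupInner d (i + 1) (val + v) else (i, val)
  | none => (i, val)
termination_by d.length - i
decreasing_by
  exact Nat.sub_succ_lt_self _ _ (List.getElem?_eq_some_iff.mp h).1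

theorem recupInner_some (d : List Int) (i : Nat) (val v : Int) (h : d[i]? = some v) :
    pvRecupInner d i val = if v = 255 then pvRecupInner d (i + 1) (val + v) else (i, val) := by
  rw [pvRecupInner]
  split <;> simp_all

theorem recupInner_none (d : List Int) (i : Nat) (val : Int) (h : d[i]? = none) :
    pvRecupInner d i val = (i, val) := by
  rw [pvRecupInner]
  split <;> simp_all

theorem pvRecupInner_ge (d : List Int) (i : Nat) (val : Int) :
    i ≤ (pvRecupInner d i val).1 := by
  induction i, val using pvRecupInner.induct (d := d) with
  | case1 i val h ih => rw [recupInner_some d i val 255 h, if_pos rfl]; omega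
  | case2 i val v h hv => rw [recupInner_some d i val v h, if_neg hv]
  | case3 i val h => rw [recupInner_none d i val h]

-- outer loop of recuperation
def pvRecup (d : List Int) (i : Nat) : List Int :=
  match h : d[i]? with
  | none => []
  | some v =>
    if v = 255 then
      let p := pvRecupInner d i 0
      (p.2 + d.getD p.1 0) :: pvRecup d (p.1 + 1)
    else v :: pvRecup d (i + 1)
termination_by d.length - i
decreasing_by
  · exact Nat.lt_of_le_of_lt
      (Nat.sub_le_sub_left (Nat.succ_le_succ (pvRecupInner_ge d i 0)) _)
      (Nat.sub_succ_lt_self _ _ (List.getElem?_eq_some_iff.mp h).1)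
  · exact Nat.sub_succ_lt_self _ _ (List.getElem?_eq_some_iff.mp h).1

-- the `while i < len(donnee)` emission loop with the `pre` toggle and string accumulator
def pvEmit (donnee : List Int) (pre : List Char) (sortie : List Char) : List Char :=
  match donnee with
  | [] => sortie
  | v :: rest =>
    if pre = [] ∨ pre = ['0'] then
      pvEmit rest ['1'] (sortie ++ PySem.List.pyRepeat ['0'] v)
    else
      pvEmit rest ['0'] (sortie ++ PySem.List.pyRepeat ['1'] v)

def rle_binaire_inverse (d : List Int) : String :=
  String.ofList (pvEmit (pvRecup d 0) [] [])

-- ===== PORT B =====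
-- `while i < n and d[i] == 255 : run += 255; i += 1`
def pvSkip (d : List Int) (i : Nat) (run : Int) : Nat × Int :=
  if h : i < d.length ∧ d.getD i 0 = 255 then pvSkip d (i + 1) (run + 255) else (i, run)
termination_by d.length - i
decreasing_by exact Nat.sub_succ_lt_self _ _ h.1

theorem pvSkip_ge (d : List Int) (i : Nat) (run : Int) : i ≤ (pvSkip d i run).1 := by
  induction i, run using pvSkip.induct (d := d) with
  | case1 i run h ih => rw [pvSkip, dif_pos h]; omega
  | case2 i run h => rw [pvSkip, dif_neg h]

-- B's single fused pass: decode one run, emit its parity-chosen chunk, continue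
def pvChunks (d : List Int) (i : Nat) (parity : Nat) : List (List Char) :=
  if hi : i < d.length then
    let p := pvSkip d i 0
    PySem.List.pyRepeat (if parity % 2 = 0 then ['0'] else ['1']) (p.2 + d.getD p.1 0)
      :: pvChunks d (p.1 + 1) (parity + 1)
  else []
termination_by d.length - i
decreasing_by
  exact Nat.lt_of_le_of_lt
    (Nat.sub_le_sub_left (Nat.succ_le_succ (pvSkip_ge d i 0)) _)
    (Nat.sub_succ_lt_self _ _ hi)

def rle_binaire_inverse_alt (d : List Int) : String :=
  String.ofList (pvChunks d 0 0).flatten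

-- ===== PRECONDITION & SPEC =====
-- Pre_ excludes exactly the inputs ending in a 255 (a 255-run reaching the end of d),
-- on which Python A raises IndexError inside recuperation (B raises there too).
def Pre_rle_binaire_inverse (d : List Int) : Prop := d.getLast? ≠ some 255
instance (d : List Int) : Decidable (Pre_rle_binaire_inverse d) := by
  unfold Pre_rle_binaire_inverse; infer_instance

def pvWitness_rle_binaire_inverse : List Int := [2, 3, 255, 255, 4, 0, 1]

def Spec_rle_binaire_inverse (d : List Int) (out : String) : Prop := out = rle_binaire_inverse_alt d
instance (d : List Int) (out : String) : Decidable (Spec_rle_binaire_inverse d out) := by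
  unfold Spec_rle_binaire_inverse; infer_instance

-- ===== CLAIM (what is proved, stated in full; the proofs are below) =====
def Claim_equal_rle_binaire_inverse : Prop := ∀ (d : List Int), Dom_rle_binaire_inverse d → Pre_rle_binaire_inverse d → Spec_rle_binaire_inverse d (rle_binaire_inverse d)

-- ===== LEMMAS AND PROOFS =====

-- equation lemmas for the outer recuperation loop
theorem recup_some (d : List Int) (i : Nat) (v : Int) (h : d[i]? = some v) :
    pvRecup d i = if v = 255 then
        ((pvRecupInner d i 0).2 + d.getD (pvRecupInner d i 0).1 0)
          :: pvRecup d ((pvRecupInner d i 0).1 + 1)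
      else v :: pvRecup d (i + 1) := by
  rw [pvRecup]
  split <;> simp_all

theorem recup_none (d : List Int) (i : Nat) (h : d[i]? = none) : pvRecup d i = [] := by
  rw [pvRecup]
  split <;> simp_all

-- A's inner 255 loop and B's skip loop compute the same pair
theorem skip_eq (d : List Int) (i : Nat) (v : Int) :
    pvRecupInner d i v = pvSkip d i v := by
  induction i, v using pvRecupInner.induct (d := d) with
  | case1 i val h ih =>
    have hi : i < d.length := (List.getElem?_eq_some_iff.mp h).1
    have hg : d.getD i 0 = 255 := by simp [List.getD, h]
    rw [recupInner_some d i val 255 h, if_pos rfl, ih]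
    conv_rhs => rw [pvSkip, dif_pos ⟨hi, hg⟩]
  | case2 i val v h hv =>
    rw [recupInner_some d i val v h, if_neg hv, pvSkip, dif_neg]
    rintro ⟨-, hg⟩
    exact hv (by simp_all [List.getD])
  | case3 i val h =>
    have hi : ¬ i < d.length := by
      intro hlt
      simp [List.getElem?_eq_getElem hlt] at h
    rw [recupInner_none d i val h, pvSkip, dif_neg (by simp [hi])]

-- the main fusion invariant: emitting A's decoded runs with toggle `pre` from accumulator
-- `sortie` equals `sortie` followed by B's chunks from the matching parity
theorem emit_eq (d : List Int) (i : Nat) (pre : List Char) (parity : Nat) (sortie : List Char)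
    (hrel : (pre = [] ∨ pre = ['0']) ↔ parity % 2 = 0) :
    pvEmit (pvRecup d i) pre sortie = sortie ++ (pvChunks d i parity).flatten := by
  by_cases hi : i < d.length
  · have h : d[i]? = some d[i] := List.getElem?_eq_getElem hi
    rw [recup_some d i d[i] h, pvChunks, dif_pos hi, ← skip_eq d i 0]
    by_cases h255 : d[i] = 255
    · rw [if_pos h255]
      by_cases hp : parity % 2 = 0
      · rw [pvEmit, if_pos (hrel.mpr hp), if_pos hp,
          emit_eq d ((pvRecupInner d i 0).1 + 1) ['1'] (parity + 1) _
            (by constructor <;> intro hx <;> simp_all <;> omega)]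
        simp [List.append_assoc]
      · rw [pvEmit, if_neg (fun hx => hp (hrel.mp hx)), if_neg hp,
          emit_eq d ((pvRecupInner d i 0).1 + 1) ['0'] (parity + 1) _
            (by constructor <;> intro hx <;> simp_all <;> omega)]
        simp [List.append_assoc]
    · rw [if_neg h255]
      have hskip : pvRecupInner d i 0 = (i, 0) := by
        rw [recupInner_some d i 0 d[i] h, if_neg h255]
      rw [hskip]
      simp only [List.getD, h, Option.getD_some, zero_add]
      by_cases hp : parity % 2 = 0
      · rw [pvEmit, if_pos (hrel.mpr hp), if_pos hp,
          emit_eq d (i + 1) ['1'] (parity + 1) _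
            (by constructor <;> intro hx <;> simp_all <;> omega)]
        simp [List.append_assoc]
      · rw [pvEmit, if_neg (fun hx => hp (hrel.mp hx)), if_neg hp,
          emit_eq d (i + 1) ['0'] (parity + 1) _
            (by constructor <;> intro hx <;> simp_all <;> omega)]
        simp [List.append_assoc]
  · have h : d[i]? = none := by
      rw [List.getElem?_eq_none_iff]; omega
    rw [recup_none d i h, pvChunks, dif_neg hi]
    simp [pvEmit]
termination_by d.length - i
decreasing_by
  · have := pvRecupInner_ge d i 0; omega
  · have := pvRecupInner_ge d i 0; omega
  · omega
  · omega

-- ===== VERDICT (by name: the statement is the Claim_ definition above) =====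
theorem rle_binaire_inverse_spec : Claim_equal_rle_binaire_inverse := by
  intro d _ _
  unfold Spec_rle_binaire_inverse rle_binaire_inverse rle_binaire_inverse_alt
  rw [emit_eq d 0 [] 0 [] (by simp)]
  simp
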